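-- pv_equiv track=rewrite | github.com/willy90815/compiler2022 | assembler_analyze.py | literal_obj
-- ===== SOURCE A (Python) =====
-- def literal_obj(index,ins):
--     obj_code = 0
--     if ins[index+1][1] == "6" and ins[1][2] == "2":
--         obj_code = int(ins[index+1][0],16)
--     elif ins[index+1][1] == "7":
--         for ch in list(ins[index+1][0].encode("ascii")):
--             obj_code = obj_code*0x100+int(ch)
--     else:
--         obj_code = int(ins[index+1][0])
--     return hex(obj_code)
-- ===== SOURCE B (Python) =====
-- def literal_obj(index, ins):
--     literal, tag = ins[index + 1][0], ins[index + 1][1]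
--     if tag == "6" and ins[1][2] == "2":
--         return hex(int(literal, 16))
--     if tag == "7":
--         # build the hex object code textually: two lowercase hex digits per
--         # ASCII byte, strip leading zeros -- no big integer is ever computed
--         digits = "".join(format(ord(c), "02x") for c in literal).lstrip("0")
--         return "0x" + (digits or "0")
--     return hex(int(literal))
-- ===== Notes on version B (the rewrite author's own statement) =====
-- stated objective: alternative
-- what changed: In the '7' branch B never computes the big-endian integer at all: it builds the hex object code textually (two lowercase hex digits per ASCII byte, leading zeros stripped, '0' if empty), replacing A's base-256 accumulation loop followed by hex(); the other branches use early returns instead of a mutated accumulator.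
import Mathlib
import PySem

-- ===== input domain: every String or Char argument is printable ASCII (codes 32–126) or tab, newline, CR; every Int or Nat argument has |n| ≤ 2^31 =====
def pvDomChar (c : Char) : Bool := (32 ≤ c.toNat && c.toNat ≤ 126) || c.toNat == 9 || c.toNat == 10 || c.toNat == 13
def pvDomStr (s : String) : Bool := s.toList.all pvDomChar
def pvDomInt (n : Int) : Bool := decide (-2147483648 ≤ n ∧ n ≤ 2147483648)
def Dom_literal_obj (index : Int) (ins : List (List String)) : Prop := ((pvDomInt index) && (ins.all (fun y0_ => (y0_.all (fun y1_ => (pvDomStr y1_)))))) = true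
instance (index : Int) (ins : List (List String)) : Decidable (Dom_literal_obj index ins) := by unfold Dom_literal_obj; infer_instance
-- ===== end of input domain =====

-- B replaces A's base-256 integer accumulation in the '7' branch by direct textual
-- construction of the hex object code (two hex digits per byte, leading zeros stripped),
-- so no big integer is ever computed there (objective: alternative; no speed claim).

-- Python's hex(n): "0x"/"-0x" prefix + lowercase hex digits of |n| (shared builtin helper).
def hexDigits : Nat → List Char
  | 0 => []
  | n + 1 => hexDigits ((n + 1) / 16) ++ [Nat.digitChar ((n + 1) % 16)]
decreasing_by exact Nat.div_lt_self (Nat.succ_pos n) (by omega)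

def pyHex (n : Int) : String :=
  (if n < 0 then "-0x" else "0x") ++
    String.ofList (if n.natAbs = 0 then ['0'] else hexDigits n.natAbs)

-- ===== PORT A =====
def literal_obj (index : Int) (ins : List (List String)) : String :=
  let row := PySem.List.pyGetD ins (index + 1) []
  let obj_code : Int :=
    if row.getD 1 "" = "6" ∧ (PySem.List.pyGetD ins 1 []).getD 2 "" = "2" then
      (PySem.Int.ofStrBase? (row.getD 0 "") 16).getD 0
    else if row.getD 1 "" = "7" then
      -- s.encode("ascii") then the base-256 accumulation loop; exact on the ASCII domain
      (row.getD 0 "").toList.foldl (fun acc ch => acc * 0x100 + (ch.toNat : Int)) 0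
    else
      (PySem.Int.ofStr? (row.getD 0 "")).getD 0
  pyHex obj_code

-- ===== PORT B =====
-- format(ord(c), "02x"): two lowercase hex digits of one ASCII byte
def hexPair (c : Char) : List Char :=
  [Nat.digitChar (c.toNat / 16), Nat.digitChar (c.toNat % 16)]

def literal_obj_alt (index : Int) (ins : List (List String)) : String :=
  let row := PySem.List.pyGetD ins (index + 1) []
  let literal := row.getD 0 ""
  let tag := row.getD 1 ""
  if tag = "6" ∧ (PySem.List.pyGetD ins 1 []).getD 2 "" = "2" then
    pyHex ((PySem.Int.ofStrBase? literal 16).getD 0)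
  else if tag = "7" then
    -- textual object code: per-byte hex pairs, lstrip("0"), "0" if everything stripped
    let ds := (literal.toList.flatMap hexPair).dropWhile (· = '0')
    "0x" ++ String.ofList (if ds = [] then ['0'] else ds)
  else
    pyHex ((PySem.Int.ofStr? literal).getD 0)

-- ===== PRECONDITION & SPEC =====
-- Pre_ excludes exactly the inputs where the Python raises: an out-of-range ins[index+1]
-- or ins[1][2] lookup (IndexError), or an int()/int(_,16) parse failure (ValueError).
def preCheck (index : Int) (ins : List (List String)) : Bool :=
  match PySem.List.pyGet? ins (index + 1) with
  | none => false
  | some row =>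
    match row[0]?, row[1]? with
    | some s, some t =>
      if t = "6" then
        match (PySem.List.pyGet? ins 1).bind (·[2]?) with
        | none => false
        | some u =>
          if u = "2" then (PySem.Int.ofStrBase? s 16).isSome
          else (PySem.Int.ofStr? s).isSome
      else if t = "7" then true
      else (PySem.Int.ofStr? s).isSome
    | _, _ => false

def Pre_literal_obj (index : Int) (ins : List (List String)) : Prop :=
  preCheck index ins = true
instance (index : Int) (ins : List (List String)) : Decidable (Pre_literal_obj index ins) := by
  unfold Pre_literal_obj; infer_instance

def pvWitness_literal_obj : Int × List (List String) := (-1, [["AB", "7"]])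

def Spec_literal_obj (index : Int) (ins : List (List String)) (out : String) : Prop := out = literal_obj_alt index ins
instance (index : Int) (ins : List (List String)) (out : String) : Decidable (Spec_literal_obj index ins out) := by unfold Spec_literal_obj; infer_instance

-- ===== CLAIM (what is proved, stated in full; the proofs are below) =====
def Claim_equal_literal_obj : Prop := ∀ (index : Int) (ins : List (List String)), Dom_literal_obj index ins → Pre_literal_obj index ins → Spec_literal_obj index ins (literal_obj index ins)

-- ===== LEMMAS AND PROOFS =====

-- hex digits of a value, zero-padded on the left to k digits
def padHex : Nat → Nat → List Char
  | _, 0 => []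
  | n, k + 1 => padHex (n / 16) k ++ [Nat.digitChar (n % 16)]

lemma hexDigits_eq (n : Nat) (h : n ≠ 0) :
    hexDigits n = hexDigits (n / 16) ++ [Nat.digitChar (n % 16)] := by
  cases n with
  | zero => exact absurd rfl h
  | succ m => rw [hexDigits]

lemma hexDigits_ne_nil (n : Nat) (h : n ≠ 0) : hexDigits n ≠ [] := by
  rw [hexDigits_eq n h]; simp

lemma digitChar_ne_zero (d : Nat) (h0 : 0 < d) (h16 : d < 16) : Nat.digitChar d ≠ '0' := by
  interval_cases d <;> decide

lemma padHex_split (a b j k : Nat) (hb : b < 16 ^ k) :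
    padHex (a * 16 ^ k + b) (j + k) = padHex a j ++ padHex b k := by
  induction k generalizing b with
  | zero => interval_cases b; simp [padHex]
  | succ k ih =>
    have hy : (16:Nat) ^ (k+1) = 16 ^ k * 16 := by ring
    rw [hy] at hb
    have hb' : b / 16 < 16 ^ k := (Nat.div_lt_iff_lt_mul (by omega)).mpr hb
    have he : a * 16 ^ (k+1) + b = b + (a * 16 ^ k) * 16 := by ring
    show padHex (a * 16 ^ (k+1) + b) ((j + k) + 1) = _
    rw [padHex, he, Nat.add_mul_div_right _ _ (by omega : (0:Nat) < 16),
      Nat.add_mul_mod_self_right, Nat.add_comm (b / 16), ih _ hb']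
    conv_rhs => rw [padHex]
    rw [List.append_assoc]

lemma dropWhile_padHex (k n : Nat) (h : n < 16 ^ k) :
    (padHex n k).dropWhile (· = '0') = hexDigits n := by
  induction k generalizing n with
  | zero => interval_cases n; simp [padHex, hexDigits]
  | succ k ih =>
    have hdiv : n / 16 < 16 ^ k := by
      have hy : (16:Nat) ^ (k+1) = 16 ^ k * 16 := by ring
      rw [hy] at h
      have := Nat.div_add_mod n 16
      have h16 : n % 16 < 16 := Nat.mod_lt _ (by omega)
      omega
    rw [padHex, List.dropWhile_append, ih _ hdiv]
    by_cases hn : n = 0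
    · subst hn
      simp [hexDigits]
      decide
    · by_cases hq : n / 16 = 0
      · have hlt : n < 16 := by omega
        have hmod : n % 16 = n := Nat.mod_eq_of_lt hlt
        rw [hq]
        simp only [hexDigits, List.isEmpty_nil, if_true, List.dropWhile]
        rw [hexDigits_eq n hn, hq, hmod]
        simp [hexDigits, digitChar_ne_zero n (by omega) hlt]
      · have hne := hexDigits_ne_nil _ hq
        rw [hexDigits_eq n hn]
        simp [List.isEmpty_iff, hne]

-- big-endian byte value, recursively
def beVal : List Char → Nat
  | [] => 0
  | c :: cs => c.toNat * 256 ^ cs.length + beVal cs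

lemma beVal_lt (cs : List Char) (h : ∀ c ∈ cs, c.toNat < 256) :
    beVal cs < 256 ^ cs.length := by
  induction cs with
  | nil => simp [beVal]
  | cons c cs ih =>
    have hc := h c (by simp)
    have hrest := ih (fun x hx => h x (by simp [hx]))
    have : (256:Nat) ^ (c :: cs).length = 256 ^ cs.length * 256 := by
      simp [List.length_cons]; ring
    rw [this, beVal]
    nlinarith [pow_pos (by omega : (0:Nat) < 256) cs.length]

lemma foldl_beVal (cs : List Char) (acc : Int) :
    cs.foldl (fun a c => a * 256 + (c.toNat : Int)) acc
      = acc * 256 ^ cs.length + (beVal cs : Int) := by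
  induction cs generalizing acc with
  | nil => simp [beVal]
  | cons c cs ih =>
    simp only [List.foldl_cons, ih, beVal, List.length_cons, pow_succ]
    push_cast
    ring

lemma flatMap_hexPair (cs : List Char) (h : ∀ c ∈ cs, c.toNat < 256) :
    cs.flatMap hexPair = padHex (beVal cs) (2 * cs.length) := by
  induction cs with
  | nil => simp [padHex]
  | cons c cs ih =>
    have hc := h c (by simp)
    have hrest : ∀ x ∈ cs, x.toNat < 256 := fun x hx => h x (by simp [hx])
    have hbe : beVal cs < 16 ^ (2 * cs.length) := by
      have : (16:Nat) ^ (2 * cs.length) = 256 ^ cs.length := by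
        rw [pow_mul]; norm_num
      rw [this]; exact beVal_lt cs hrest
    have hpair : hexPair c = padHex c.toNat 2 := by
      have hq : c.toNat / 16 < 16 := by omega
      simp [hexPair, padHex, Nat.mod_eq_of_lt hq]
    have hlen : 2 * (c :: cs).length = 2 + 2 * cs.length := by
      simp [List.length_cons]; ring
    rw [List.flatMap_cons, ih hrest, hpair, beVal, hlen,
      ← padHex_split c.toNat (beVal cs) 2 (2 * cs.length) hbe]
    congr 2
    rw [pow_mul]; norm_num

lemma beVal_eq_zero_iff_hexDigits (n : Nat) : (hexDigits n = []) ↔ n = 0 := by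
  constructor
  · intro h
    by_contra hn
    exact hexDigits_ne_nil n hn h
  · intro h; subst h; simp [hexDigits]

-- the '7' branch: A's numeric hex equals B's textual construction
lemma branch7_eq (s : String) (h : ∀ c ∈ s.toList, c.toNat < 256) :
    pyHex (s.toList.foldl (fun acc ch => acc * 0x100 + (ch.toNat : Int)) 0)
      = "0x" ++ String.ofList
          (if (s.toList.flatMap hexPair).dropWhile (· = '0') = [] then ['0']
           else (s.toList.flatMap hexPair).dropWhile (· = '0')) := by
  have hv : s.toList.foldl (fun acc ch => acc * 0x100 + (ch.toNat : Int)) 0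
      = (beVal s.toList : Int) := by
    rw [foldl_beVal]; ring
  have hbound : beVal s.toList < 16 ^ (2 * s.toList.length) := by
    have : (16:Nat) ^ (2 * s.toList.length) = 256 ^ s.toList.length := by
      rw [pow_mul]; norm_num
    rw [this]; exact beVal_lt _ h
  rw [hv, flatMap_hexPair _ h, dropWhile_padHex _ _ hbound]
  unfold pyHex
  have hnn : ¬ ((beVal s.toList : Int) < 0) := by omega
  rw [if_neg hnn]
  simp only [Int.natAbs_natCast]
  by_cases h0 : beVal s.toList = 0
  · rw [h0]; simp [hexDigits]
  · rw [if_neg h0, if_neg (fun hh => h0 (beVal_eq_zero_iff_hexDigits _ |>.mp hh))]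

-- chars reached through ins[index+1][j] are ASCII bytes under Dom
lemma dom_bytes (index : Int) (ins : List (List String)) (i : Int) (j : Nat)
    (hd : Dom_literal_obj index ins) :
    ∀ c ∈ ((PySem.List.pyGetD ins i []).getD j "").toList, c.toNat < 256 := by
  intro c hc
  unfold Dom_literal_obj at hd
  simp only [Bool.and_eq_true, List.all_eq_true] at hd
  cases hrow : PySem.List.pyGet? ins i with
  | none =>
    rw [PySem.List.pyGetD_of_none _ _ _ hrow] at hc
    simp at hc
  | some row =>
    have hmem : row ∈ ins := by exact PySem.List.mem_of_pyGet?_eq_some _ hrow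
    have hrowD : PySem.List.pyGetD ins i ([] : List String) = row := by
      simp [PySem.List.pyGetD, hrow]
    rw [hrowD] at hc
    cases hs : row[j]? with
    | none => rw [List.getD_eq_getElem?_getD, hs] at hc; simp at hc
    | some s =>
      have hsmem : s ∈ row := List.mem_of_getElem? hs
      have := hd.2 row hmem s hsmem
      unfold pvDomStr at this
      rw [List.all_eq_true] at this
      rw [List.getD_eq_getElem?_getD, hs] at hc
      have := this c hc
      unfold pvDomChar at this
      simp at this
      omega

-- ===== VERDICT (by name: the statement is the Claim_ definition above) =====
set_option maxHeartbeats 1000000 in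
theorem literal_obj_spec : Claim_equal_literal_obj := by
  intro index ins hd _
  unfold Spec_literal_obj literal_obj literal_obj_alt
  dsimp only
  by_cases h1 : (PySem.List.pyGetD ins (index + 1) []).getD 1 "" = "6" ∧ (PySem.List.pyGetD ins 1 []).getD 2 "" = "2"
  · rw [if_pos h1, if_pos h1]
  · rw [if_neg h1, if_neg h1]
    by_cases h2 : (PySem.List.pyGetD ins (index + 1) []).getD 1 "" = "7"
    · rw [if_pos h2, if_pos h2]
      exact branch7_eq _ (dom_bytes index ins (index + 1) 0 hd)
    · rw [if_neg h2, if_neg h2]
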